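-- pv_equiv track=rewrite | github.com/Aditya747S/BioToolkit.jl | Examples/Comparison/window_coverage_compare.py | window_coverage
-- ===== SOURCE A (Python) =====
-- from collections import defaultdict
--
-- def window_coverage(starts, stops, window_size):
--     coverage = defaultdict(int)
--     for start, stop in zip(starts, stops):
--         if stop <= start:
--             continue
--         first_window = start // window_size
--         last_window = (stop - 1) // window_size
--         for window_index in range(first_window, last_window + 1):
--             window_start = window_index * window_size
--             window_stop = window_start + window_size
--             overlap_start = max(start, window_start)
--             overlap_stop = min(stop, window_stop)
--             overlap = overlap_stop - overlap_start
--             if overlap > 0: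
--                 coverage[window_index] += overlap
--     return dict(coverage)
-- ===== SOURCE B (Python) =====
-- def window_coverage(starts, stops, window_size):
--     # Two-phase transpose of the loops: first collect the windows in first-touch
--     # order, then compute each window's total as a direct sum over the intervals.
--     intervals = [(a, b) for a, b in zip(starts, stops) if a < b]
--     keys = []
--     seen = set()
--     for a, b in intervals:
--         for w in range(a // window_size, (b - 1) // window_size + 1):
--             if w not in seen:
--                 seen.add(w)
--                 keys.append(w)
--     return {w: sum(min(b, (w + 1) * window_size) - max(a, w * window_size)
--                    for a, b in intervals
--                    if a < (w + 1) * window_size and w * window_size < b)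
--             for w in keys}
-- ===== Notes on version B (the rewrite author's own statement) =====
-- stated objective: alternative
-- what changed: Replaces A's single pass that increments a dict entry per (interval, window) with a two-phase transpose: first collect the touched windows in first-touch order, then compute each window's total directly as a clamp-sum over the intervals; Pre_ excludes non-positive window sizes (outside the natural domain: window_size = 0 raises ZeroDivisionError and negative sizes give accidental positive-overlap-filter results B does not mimic).
-- outside the precondition, e.g. on window_coverage([2], [7], -6): A returns {}, B returns {-1: 0}
import Mathlib
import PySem

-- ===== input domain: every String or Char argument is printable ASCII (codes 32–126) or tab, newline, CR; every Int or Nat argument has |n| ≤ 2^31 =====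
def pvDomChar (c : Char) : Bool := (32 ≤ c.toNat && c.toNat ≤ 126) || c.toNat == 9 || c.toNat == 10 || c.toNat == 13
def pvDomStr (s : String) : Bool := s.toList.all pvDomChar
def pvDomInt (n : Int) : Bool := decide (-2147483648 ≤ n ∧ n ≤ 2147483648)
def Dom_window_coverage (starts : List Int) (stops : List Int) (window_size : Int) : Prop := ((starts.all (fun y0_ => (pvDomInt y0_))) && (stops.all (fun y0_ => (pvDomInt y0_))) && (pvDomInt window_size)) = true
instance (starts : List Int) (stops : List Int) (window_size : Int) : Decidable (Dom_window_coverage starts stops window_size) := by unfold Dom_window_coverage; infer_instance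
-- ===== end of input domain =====

-- B replaces A's single pass that increments a dict per (interval, window) by a two-phase
-- transpose: collect the touched windows in first-touch order, then compute each window's
-- total directly as a clamp-sum over the intervals (objective: alternative, same cost class).

-- ===== PORT A =====
def window_coverage (starts : List Int) (stops : List Int) (window_size : Int) : List (Int × Int) :=
  ((List.zip starts stops).foldl (fun (coverage : PySem.Dict Int Int) p =>
    if p.2 ≤ p.1 then coverage
    else
      let first_window := PySem.Int.floordiv p.1 window_size
      let last_window := PySem.Int.floordiv (p.2 - 1) window_size
      (PySem.List.pyRange first_window (last_window + 1) 1).foldl (fun coverage window_index =>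
        let window_start := window_index * window_size
        let window_stop := window_start + window_size
        let overlap_start := max p.1 window_start
        let overlap_stop := min p.2 window_stop
        let overlap := overlap_stop - overlap_start
        if 0 < overlap then coverage.insert window_index (coverage.getD window_index 0 + overlap)
        else coverage) coverage)
    PySem.Dict.empty).items

-- ===== PORT B =====
-- Python B keeps a `seen` set plus an append list; PySem.Set.add is exactly that pair
-- (first-insertion order, skip duplicates), so `keys` is one Set-building fold.
def window_coverage_alt (starts : List Int) (stops : List Int) (window_size : Int) : List (Int × Int) :=
  let intervals := (List.zip starts stops).filter (fun p => decide (p.1 < p.2))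
  let keys : PySem.Set Int := intervals.foldl (fun ks p =>
      (PySem.List.pyRange (PySem.Int.floordiv p.1 window_size)
        (PySem.Int.floordiv (p.2 - 1) window_size + 1) 1).foldl
        (fun ks w => PySem.Set.add ks w) ks) PySem.Set.empty
  (keys.foldl (fun (d : PySem.Dict Int Int) w =>
      d.insert w (intervals.foldl (fun s p =>
        if p.1 < (w + 1) * window_size ∧ w * window_size < p.2 then
          s + (min p.2 ((w + 1) * window_size) - max p.1 (w * window_size))
        else s) 0))
    PySem.Dict.empty).items

-- ===== PRECONDITION & SPEC =====
-- Pre_ restricts to the natural domain window_size ≥ 1: window_size = 0 raises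
-- ZeroDivisionError in A (except when no interval is processed), and for negative window
-- sizes A's positive-overlap filter produces accidental results B does not mimic.
def Pre_window_coverage (starts : List Int) (stops : List Int) (window_size : Int) : Prop := 1 ≤ window_size
instance (starts : List Int) (stops : List Int) (window_size : Int) : Decidable (Pre_window_coverage starts stops window_size) := by unfold Pre_window_coverage; infer_instance
def pvWitness_window_coverage : List Int × List Int × Int := ([0, 5], [4, 9], 2)

def Spec_window_coverage (starts : List Int) (stops : List Int) (window_size : Int) (out : List (Int × Int)) : Prop := out = window_coverage_alt starts stops window_size
instance (starts : List Int) (stops : List Int) (window_size : Int) (out : List (Int × Int)) : Decidable (Spec_window_coverage starts stops window_size out) := by unfold Spec_window_coverage; infer_instance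

-- ===== CLAIM (what is proved, stated in full; the proofs are below) =====
def Claim_equal_window_coverage : Prop := ∀ (starts : List Int) (stops : List Int) (window_size : Int), Dom_window_coverage starts stops window_size → Pre_window_coverage starts stops window_size → Spec_window_coverage starts stops window_size (window_coverage starts stops window_size)

-- ===== LEMMAS AND PROOFS =====

-- the common vocabulary of both ports
def pvStep : PySem.Dict Int Int → (Int × Int) → PySem.Dict Int Int :=
  fun d p => d.insert p.1 (d.getD p.1 0 + p.2)

def pvWindows (ws : Int) (p : Int × Int) : List Int :=
  PySem.List.pyRange (PySem.Int.floordiv p.1 ws) (PySem.Int.floordiv (p.2 - 1) ws + 1) 1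

def pvOv (ws : Int) (p : Int × Int) (w : Int) : Int :=
  min p.2 (w * ws + ws) - max p.1 (w * ws)

def pvPairs (ws : Int) (p : Int × Int) : List (Int × Int) :=
  (pvWindows ws p).map (fun w => (w, pvOv ws p w))

def pvP (starts stops : List Int) (ws : Int) : List (Int × Int) :=
  (((List.zip starts stops).filter (fun p => decide (p.1 < p.2))).flatMap (pvPairs ws))

def pvWeight (starts stops : List Int) (ws : Int) (w : Int) : Int :=
  (((pvP starts stops ws).filter (fun p => p.1 == w)).map (·.2)).sum

-- membership in a window range, in bracket form
lemma pv_mem_windows {ws : Int} (hws : 1 ≤ ws) (p : Int × Int) (w : Int) :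
    w ∈ pvWindows ws p ↔ (p.1 < (w + 1) * ws ∧ w * ws < p.2) := by
  unfold pvWindows
  rw [PySem.List.mem_pyRange_one]
  have h1 : PySem.Int.floordiv p.1 ws < w + 1 ↔ p.1 < (w + 1) * ws :=
    PySem.Int.floordiv_lt_iff_lt_mul (by omega)
  have h2 : w ≤ PySem.Int.floordiv (p.2 - 1) ws ↔ w * ws ≤ p.2 - 1 :=
    PySem.Int.le_floordiv_iff_mul_le (by omega)
  omega

lemma pv_ov_pos {ws : Int} (hws : 1 ≤ ws) {p : Int × Int} (hp : p.1 < p.2) {w : Int}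
    (hw : w ∈ pvWindows ws p) : 0 < pvOv ws p w := by
  rw [pv_mem_windows hws] at hw
  unfold pvOv
  have h1 : p.1 < w * ws + ws := by have := hw.1; nlinarith
  have h2 : w * ws < p.2 := hw.2
  rcases le_total p.2 (w * ws + ws) with h | h <;>
    rcases le_total p.1 (w * ws) with h' | h' <;>
      simp [min_def, max_def] <;> omega

-- fold of an inner fold is a fold over the flatMap
lemma pv_foldl_foldl {α β γ : Type} (g : β → List γ) (f : α → γ → α) :
    ∀ (l : List β) (a : α), l.foldl (fun a p => (g p).foldl f a) a = (l.flatMap g).foldl f a := by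
  intro l
  induction l with
  | nil => intro a; simp
  | cons x t ih => intro a; simp [List.flatMap_cons, List.foldl_append, ih]

-- a guarded flatMap is a flatMap over the filter
lemma pv_flatMap_if {α β : Type} (c : α → Bool) (g : α → List β) (l : List α) :
    l.flatMap (fun p => if c p then g p else []) = (l.filter c).flatMap g := by
  induction l with
  | nil => rfl
  | cons x t ih => by_cases h : c x <;> simp [List.flatMap_cons, h, ih]

-- sum of a flatMap, summed inner list by inner list
lemma pv_sum_flatMap {α : Type} (g : α → List Int) (l : List α) :
    (l.flatMap g).sum = (l.map (fun p => (g p).sum)).sum := by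
  induction l with
  | nil => rfl
  | cons x t ih => simp [List.flatMap_cons, ih]

-- filtering a duplicate-free list down to one known element
lemma pv_filter_eq_singleton {l : List Int} (hnd : l.Nodup) {w : Int} (hw : w ∈ l) :
    l.filter (fun x => x == w) = [w] := by
  induction l with
  | nil => cases hw
  | cons x t ih =>
    rcases List.nodup_cons.mp hnd with ⟨hx, hndt⟩
    rcases List.mem_cons.mp hw with h | h
    · have hxw : (x == w) = true := by simp [h.symm]
      have hft : t.filter (fun y => y == w) = [] := by
        rw [List.filter_eq_nil_iff]; intro y hy hbe
        have hyw : y = w := by simpa using hbe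
        subst hyw
        exact hx (h ▸ hy)
      simp [List.filter_cons, hxw, hft, h.symm]
    · have hne : (x == w) = false := by
        simp only [beq_eq_false_iff_ne, ne_eq]
        intro he; subst he; exact hx h
      simp [List.filter_cons, hne, ih hndt h]

-- weighted-counter lookup
lemma pv_getD_foldl_step (v : Int) :
    ∀ (l : List (Int × Int)) (d : PySem.Dict Int Int),
      (l.foldl pvStep d).getD v 0 = d.getD v 0 + ((l.filter (fun p => p.1 == v)).map (·.2)).sum := by
  intro l
  induction l with
  | nil => intro d; simp
  | cons x t ih =>
    intro d
    simp only [List.foldl_cons, pvStep, ih, List.filter_cons]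
    by_cases h : x.1 = v
    · simp [h, PySem.Dict.getD_insert]; ring
    · have hb : (x.1 == v) = false := by simp [h]
      have h' : ¬ v = x.1 := fun he => h he.symm
      simp [hb, PySem.Dict.getD_insert, h']

-- guarded additive fold as a sum of guarded terms
lemma pv_foldl_if_add {α : Type} (c : α → Prop) [DecidablePred c] (g : α → Int) :
    ∀ (l : List α) (a : Int),
      l.foldl (fun s p => if c p then s + g p else s) a
        = a + (l.map (fun p => if c p then g p else 0)).sum := by
  intro l
  induction l with
  | nil => intro a; simp
  | cons x t ih => intro a; by_cases h : c x <;> simp [h, ih] <;> ring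

-- fold of Set.update is one big update over the flatMap
lemma pv_foldl_update {α : Type} [BEq α] (g : (Int × Int) → List α) :
    ∀ (l : List (Int × Int)) (s : PySem.Set α),
      l.foldl (fun s p => PySem.Set.update s (g p)) s = PySem.Set.update s (l.flatMap g) := by
  intro l
  induction l with
  | nil => intro s; simp [PySem.Set.update]
  | cons x t ih => intro s; simp [List.flatMap_cons, PySem.Set.update_append, ih]

-- A's value, normalised: a weighted-counter fold over pvP
lemma pv_A_eq (starts stops : List Int) {ws : Int} (hws : 1 ≤ ws) :
    window_coverage starts stops ws = ((pvP starts stops ws).foldl pvStep PySem.Dict.empty).items := by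
  unfold window_coverage pvP
  congr 1
  rw [PySem.List.foldl_congr_mem
    (g := fun d p => (if decide (p.1 < p.2) then pvPairs ws p else []).foldl pvStep d)
    (h := by
      intro d p _
      by_cases hlt : p.1 < p.2
      · have hd : decide (p.1 < p.2) = true := by simpa using hlt
        show (if p.2 ≤ p.1 then d
          else (pvWindows ws p).foldl (fun coverage w =>
            if 0 < min p.2 (w * ws + ws) - max p.1 (w * ws) then
              coverage.insert w (coverage.getD w 0 + (min p.2 (w * ws + ws) - max p.1 (w * ws)))
            else coverage) d)
          = List.foldl pvStep d (if decide (p.1 < p.2) = true then pvPairs ws p else [])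
        rw [if_neg (by omega), hd, if_pos rfl]
        simp only [pvPairs]
        rw [List.foldl_map]
        apply PySem.List.foldl_congr_mem
        intro acc w hw
        have hpos : 0 < pvOv ws p w := pv_ov_pos hws hlt hw
        unfold pvOv at hpos
        show (if 0 < min p.2 (w * ws + ws) - max p.1 (w * ws) then
            acc.insert w (acc.getD w 0 + (min p.2 (w * ws + ws) - max p.1 (w * ws)))
          else acc) = pvStep acc (w, pvOv ws p w)
        rw [if_pos hpos]
        rfl
      · have hd : decide (p.1 < p.2) = false := by simpa using hlt
        show (if p.2 ≤ p.1 then d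
          else (pvWindows ws p).foldl (fun coverage w =>
            if 0 < min p.2 (w * ws + ws) - max p.1 (w * ws) then
              coverage.insert w (coverage.getD w 0 + (min p.2 (w * ws + ws) - max p.1 (w * ws)))
            else coverage) d)
          = List.foldl pvStep d (if decide (p.1 < p.2) = true then pvPairs ws p else [])
        rw [if_pos (by omega), hd]
        simp)]
  rw [pv_foldl_foldl (g := fun p => if decide (p.1 < p.2) = true then pvPairs ws p else []) (f := pvStep)]
  rw [pv_flatMap_if (c := fun p => decide (p.1 < p.2)) (g := pvPairs ws)]

-- B's key list is the first-appearance dedup of pvP's keys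
lemma pv_B_keys (starts stops : List Int) (ws : Int) :
    ((List.zip starts stops).filter (fun p => decide (p.1 < p.2))).foldl (fun ks p =>
        (PySem.List.pyRange (PySem.Int.floordiv p.1 ws) (PySem.Int.floordiv (p.2 - 1) ws + 1) 1).foldl
          (fun ks w => PySem.Set.add ks w) ks) PySem.Set.empty
      = PySem.Set.ofList ((pvP starts stops ws).map (·.1)) := by
  calc ((List.zip starts stops).filter (fun p => decide (p.1 < p.2))).foldl (fun ks p =>
        (PySem.List.pyRange (PySem.Int.floordiv p.1 ws) (PySem.Int.floordiv (p.2 - 1) ws + 1) 1).foldl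
          (fun ks w => PySem.Set.add ks w) ks) PySem.Set.empty
      = ((List.zip starts stops).filter (fun p => decide (p.1 < p.2))).foldl (fun ks p =>
          PySem.Set.update ks (pvWindows ws p)) PySem.Set.empty := by
        apply PySem.List.foldl_congr_mem
        intro acc p _
        rw [PySem.Set.update]
        rfl
    _ = PySem.Set.update PySem.Set.empty
          (((List.zip starts stops).filter (fun p => decide (p.1 < p.2))).flatMap (pvWindows ws)) :=
        pv_foldl_update (pvWindows ws) _ _
    _ = PySem.Set.ofList ((pvP starts stops ws).map (·.1)) := by
        rw [PySem.Set.update_empty]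
        congr 1
        unfold pvP
        rw [List.map_flatMap]
        congr 1
        funext p
        simp only [pvPairs, List.map_map]
        symm
        simp [Function.comp_def]

-- B's per-window sum equals the weight of that key in pvP
lemma pv_B_val (starts stops : List Int) {ws : Int} (hws : 1 ≤ ws) (w : Int) :
    ((List.zip starts stops).filter (fun p => decide (p.1 < p.2))).foldl (fun s p =>
        if p.1 < (w + 1) * ws ∧ w * ws < p.2 then
          s + (min p.2 ((w + 1) * ws) - max p.1 (w * ws))
        else s) 0
      = pvWeight starts stops ws w := by
  unfold pvWeight pvP
  rw [pv_foldl_if_add, List.filter_flatMap, List.map_flatMap, pv_sum_flatMap, zero_add]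
  apply congrArg
  apply List.map_congr_left
  intro p hp
  have hplt : p.1 < p.2 := by
    have := List.of_mem_filter hp; simpa using this
  have hnd : (pvWindows ws p).Nodup := by
    unfold pvWindows; exact PySem.List.nodup_pyRange_one _ _
  by_cases hc : p.1 < (w + 1) * ws ∧ w * ws < p.2
  · have hmem : w ∈ pvWindows ws p := (pv_mem_windows hws p w).mpr hc
    have hf : (pvPairs ws p).filter (fun q => q.1 == w) = [(w, pvOv ws p w)] := by
      unfold pvPairs
      rw [List.filter_map]
      have he : ((fun q : Int × Int => q.1 == w) ∘ (fun w' => (w', pvOv ws p w'))) = (fun w' => w' == w) := by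
        funext w'; simp [Function.comp]
      rw [he, pv_filter_eq_singleton hnd hmem]
      rfl
    rw [hf]
    simp only [List.map_cons, List.map_nil, List.sum_cons, List.sum_nil, add_zero]
    rw [if_pos hc]
    unfold pvOv
    ring_nf
  · have hmem : w ∉ pvWindows ws p := fun h => hc ((pv_mem_windows hws p w).mp h)
    have hf : (pvPairs ws p).filter (fun q => q.1 == w) = [] := by
      unfold pvPairs
      rw [List.filter_map, List.filter_eq_nil_iff.mpr]
      · rfl
      · intro w' hw'
        simp only [Function.comp, beq_iff_eq]
        intro he; exact hmem (he ▸ hw')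
    rw [hf, if_neg hc]
    rfl

-- B's value, normalised
lemma pv_B_eq (starts stops : List Int) {ws : Int} (hws : 1 ≤ ws) :
    window_coverage_alt starts stops ws
      = (PySem.Set.ofList ((pvP starts stops ws).map (·.1))).map
          (fun w => (w, pvWeight starts stops ws w)) := by
  simp only [window_coverage_alt]
  rw [pv_B_keys]
  have h := PySem.Dict.items_foldl_insert_fresh
    (l := PySem.Set.ofList ((pvP starts stops ws).map (·.1)))
    (k := fun w => w)
    (v := fun w => ((List.zip starts stops).filter (fun p => decide (p.1 < p.2))).foldl (fun s p =>
        if p.1 < (w + 1) * ws ∧ w * ws < p.2 then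
          s + (min p.2 ((w + 1) * ws) - max p.1 (w * ws))
        else s) 0)
    (d := PySem.Dict.empty)
    (by intro a _; simp)
    (by simpa using PySem.Set.nodup_ofList ((pvP starts stops ws).map (·.1)))
  beta_reduce at h
  rw [h]
  simp only [PySem.Dict.items, PySem.Dict.empty, List.nil_append]
  apply List.map_congr_left
  intro w _
  rw [pv_B_val starts stops hws w]

-- A's value, fully characterised
lemma pv_A_char (starts stops : List Int) {ws : Int} (hws : 1 ≤ ws) :
    window_coverage starts stops ws
      = (PySem.Set.ofList ((pvP starts stops ws).map (·.1))).map
          (fun w => (w, pvWeight starts stops ws w)) := by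
  rw [pv_A_eq starts stops hws]
  have hb : pvStep = (fun (d : PySem.Dict Int Int) (x : Int × Int) =>
      d.insert ((fun p : Int × Int => p.1) x) ((fun (d : PySem.Dict Int Int) (p : Int × Int) => d.getD p.1 0 + p.2) d x)) := rfl
  have hnd : ((pvP starts stops ws).foldl pvStep PySem.Dict.empty).keys.Nodup := by
    rw [hb]
    exact PySem.Dict.nodup_keys_foldl_insert_key _ _ _ _ PySem.Dict.nodup_keys_empty
  have hkeys : ((pvP starts stops ws).foldl pvStep PySem.Dict.empty).keys
      = PySem.Set.ofList ((pvP starts stops ws).map (·.1)) := by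
    rw [hb, PySem.Dict.keys_foldl_insert_key]
    rw [show (PySem.Dict.empty : PySem.Dict Int Int).keys = ([] : List Int) from rfl]
    rw [show PySem.Set.update ([] : List Int) ((pvP starts stops ws).map (fun p : Int × Int => p.1)) = PySem.Set.empty.update ((pvP starts stops ws).map (fun p : Int × Int => p.1)) from rfl]
    rw [PySem.Set.update_empty]
  rw [PySem.Dict.items_eq_map_keys _ hnd 0, hkeys]
  apply List.map_congr_left
  intro w _
  rw [pv_getD_foldl_step]
  simp [pvWeight]

-- ===== VERDICT (by name: the statement is the Claim_ definition above) =====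
theorem window_coverage_spec : Claim_equal_window_coverage := by
  intro starts stops ws _ hws
  unfold Spec_window_coverage
  rw [pv_A_char starts stops hws, pv_B_eq starts stops hws]
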